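-- pv_equiv track=rewrite | github.com/Radcliffe/OEIS-Python | src/oeispy/A216/A216267.py | rootPronic
-- ===== SOURCE A (Python) =====
-- def rootPronic(a):
--     sr = 1<<33
--     while a < sr*(sr+1):
--       sr>>=1
--     b = sr>>1
--     while b:
--         s = sr+b
--         if a >= s*(s+1):
--           sr = s
--         b>>=1
--     return sr
-- ===== SOURCE B (Python) =====
-- def _isqrt(n):
--     # Newton's method for floor(sqrt(n)); n >= 0
--     if n <= 1:
--         return n
--     x = n // 2
--     while True:
--         y = (x + n // x) // 2
--         if y >= x:
--             return x
--         x = y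
--
--
-- def rootPronic(a):
--     # largest r with r*(r+1) <= a, via r = (isqrt(4a+1)-1)//2
--     return (_isqrt(4 * a + 1) - 1) // 2
-- ===== Notes on version B (the rewrite author's own statement) =====
-- stated objective: alternative
-- what changed: Replaces A's two hand-rolled binary-search loops (find a power-of-two bracket, then refine bit by bit) with a closed-form reduction to the integer square root computed by Newton's method: rootPronic(a) = (isqrt(4a+1)-1)//2.
import Mathlib
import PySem

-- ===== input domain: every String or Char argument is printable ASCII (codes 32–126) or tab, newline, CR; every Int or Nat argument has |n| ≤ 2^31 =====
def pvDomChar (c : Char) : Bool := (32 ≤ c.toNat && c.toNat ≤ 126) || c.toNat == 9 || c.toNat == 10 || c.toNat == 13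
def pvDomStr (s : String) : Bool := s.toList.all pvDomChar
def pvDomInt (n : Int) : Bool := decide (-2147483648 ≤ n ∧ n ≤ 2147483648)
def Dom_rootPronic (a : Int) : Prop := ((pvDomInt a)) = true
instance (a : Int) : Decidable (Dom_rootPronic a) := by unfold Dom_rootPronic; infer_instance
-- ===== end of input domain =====

-- B replaces A's two binary-search loops by Newton's method for the integer square root
-- (r = (isqrt(4a+1)-1)//2): a different algorithm of similar cost (objective: alternative).

-- ===== PORT A =====
-- 'while a < sr*(sr+1): sr >>= 1' — fuel 64 is a totality guard only: sr starts at 2^33 and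
-- halves each step, and for a ≥ 0 the loop exits before the fuel runs out (proved below);
-- for a < 0 the Python loop never terminates (excluded by Pre_).
def pvHalveLoop (fuel : Nat) (a sr : Int) : Int :=
  match fuel with
  | 0 => sr
  | f + 1 => if a < sr * (sr + 1) then pvHalveLoop f a (sr >>> (1:Nat)) else sr

-- 'while b: s = sr+b; if a >= s*(s+1): sr = s; b >>= 1'  (s = sr + b inlined);
-- b starts at sr>>1 ≤ 2^32 and halves each step, so fuel 64 is again ample.
def pvDownLoop (fuel : Nat) (a sr b : Int) : Int :=
  match fuel with
  | 0 => sr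
  | f + 1 =>
    if b ≠ 0 then
      pvDownLoop f a (if a ≥ (sr + b) * (sr + b + 1) then sr + b else sr) (b >>> (1:Nat))
    else sr

def rootPronic (a : Int) : Int :=
  let sr := pvHalveLoop 64 a ((1:Int) <<< (33:Nat))
  pvDownLoop 64 a sr (sr >>> (1:Nat))

-- ===== PORT B =====
-- Newton step y = (x + n//x)//2
def pvNewtonStep (n x : Int) : Int :=
  PySem.Int.floordiv (x + PySem.Int.floordiv n x) 2

-- 'while True: y = (x + n//x)//2; if y >= x: return x; x = y'.  The '0 < y' conjunct is a
-- termination guard only: on every state this port reaches (n ≥ 2, x ≥ 1) y ≥ 1 holds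
-- (proved below), so the recursion condition coincides with Python's 'y < x'.
def pvNewtonIter (n x : Int) : Int :=
  if h : 0 < pvNewtonStep n x ∧ pvNewtonStep n x < x then pvNewtonIter n (pvNewtonStep n x)
  else x
termination_by x.toNat
decreasing_by omega

def pvIsqrt (n : Int) : Int :=
  if n ≤ 1 then n else pvNewtonIter n (PySem.Int.floordiv n 2)

def rootPronic_alt (a : Int) : Int :=
  PySem.Int.floordiv (pvIsqrt (4 * a + 1) - 1) 2

-- ===== PRECONDITION & SPEC =====
-- Pre_ excludes negative inputs, on which Python A's first loop never terminates.
def Pre_rootPronic (a : Int) : Prop := 0 ≤ a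
instance (a : Int) : Decidable (Pre_rootPronic a) := by unfold Pre_rootPronic; infer_instance
def pvWitness_rootPronic : Int := 42

def Spec_rootPronic (a : Int) (out : Int) : Prop := out = rootPronic_alt a
instance (a : Int) (out : Int) : Decidable (Spec_rootPronic a out) := by unfold Spec_rootPronic; infer_instance

-- ===== CLAIM (what is proved, stated in full; the proofs are below) =====
def Claim_equal_rootPronic : Prop := ∀ (a : Int), Dom_rootPronic a → Pre_rootPronic a → Spec_rootPronic a (rootPronic a)

-- ===== LEMMAS AND PROOFS =====

-- the answer is the unique r ≥ 0 with r(r+1) ≤ a < (r+1)(r+2)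
def pvChar (a r : Int) : Prop := 0 ≤ r ∧ r * (r + 1) ≤ a ∧ a < (r + 1) * (r + 2)

-- what loop 1 establishes: r(r+1) ≤ a, and r is 0 (with a < 2) or a power 2^j, j ≤ k,
-- with the upper bound a < 2r(2r+1) that loop 2 starts from
def pvChar0 (a r : Int) (k : Nat) : Prop :=
  0 ≤ r ∧ r * (r + 1) ≤ a ∧
    ((r = 0 ∧ a < 2) ∨ (∃ j : Nat, j ≤ k ∧ r = 2 ^ j ∧ a < 2 * r * (2 * r + 1)))

lemma pvChar_unique {a r₁ r₂ : Int} (h₁ : pvChar a r₁) (h₂ : pvChar a r₂) : r₁ = r₂ := by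
  obtain ⟨n₁, l₁, u₁⟩ := h₁; obtain ⟨n₂, l₂, u₂⟩ := h₂
  by_contra hne
  rcases lt_or_gt_of_ne hne with h | h
  · nlinarith
  · nlinarith

lemma pvShiftOne (x : Int) : x >>> (1:Nat) = x / 2 := by
  rw [Int.shiftRight_eq_div_pow]; norm_num

lemma pvHalveLoop_zero (f : Nat) (a : Int) (ha : 0 ≤ a) : pvHalveLoop f a 0 = 0 := by
  cases f with
  | zero => rfl
  | succ f => rw [pvHalveLoop, if_neg (by simpa using ha)]

lemma pvHalveLoop_spec (a : Int) (ha : 0 ≤ a) :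
    ∀ f k : Nat, k < f → a < 2 ^ (k + 1) * (2 ^ (k + 1) + 1) →
      pvChar0 a (pvHalveLoop f a (2 ^ k)) k := by
  intro f
  induction f with
  | zero => intro k hk _; exact absurd hk (Nat.not_lt_zero k)
  | succ f ih =>
    intro k hk hub
    rw [pvHalveLoop]
    split
    · rename_i hcond
      cases k with
      | zero =>
        have h1 : ((2:Int) ^ 0) >>> (1:Nat) = 0 := by decide
        rw [h1, pvHalveLoop_zero f a ha]
        norm_num at hcond
        exact ⟨le_refl _, by simpa using ha, Or.inl ⟨rfl, by omega⟩⟩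
      | succ k' =>
        have h1 : ((2:Int) ^ (k' + 1)) >>> (1:Nat) = 2 ^ k' := by
          rw [pvShiftOne, pow_succ, Int.mul_ediv_cancel _ (by norm_num)]
        rw [h1]
        have hres := ih k' (by omega) hcond
        obtain ⟨h1', h2', h3'⟩ := hres
        refine ⟨h1', h2', ?_⟩
        rcases h3' with h | ⟨j, hj, hrj, hbd⟩
        · exact Or.inl h
        · exact Or.inr ⟨j, by omega, hrj, hbd⟩
    · rename_i hcond
      push_neg at hcond
      have hpos : (0:Int) < 2 ^ k := pow_pos (by norm_num) k
      refine ⟨by positivity, hcond, Or.inr ⟨k, le_refl _, rfl, ?_⟩⟩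
      have he : (2:Int) ^ (k + 1) = 2 * 2 ^ k := by rw [pow_succ]; ring
      calc a < 2 ^ (k + 1) * (2 ^ (k + 1) + 1) := hub
        _ = 2 * 2 ^ k * (2 * 2 ^ k + 1) := by rw [he]

-- loop 2 invariant: b is 0 or a power of two below 2^f; sr is a lower solution and
-- sr + 2b bounds the answer above
lemma pvDownLoop_spec (a : Int) :
    ∀ f : Nat, ∀ b sr : Int, 0 ≤ sr →
      (b = 0 ∨ ∃ j : Nat, j < f ∧ b = 2 ^ j) →
      sr * (sr + 1) ≤ a →
      (b = 0 → a < (sr + 1) * (sr + 2)) →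
      (b ≠ 0 → a < (sr + 2 * b) * (sr + 2 * b + 1)) →
      pvChar a (pvDownLoop f a sr b) := by
  intro f
  induction f with
  | zero =>
    intro b sr hsr hb hlo h0 _
    have hb0 : b = 0 := by
      rcases hb with h | ⟨j, hj, h2⟩
      · exact h
      · exact absurd hj (Nat.not_lt_zero j)
    subst hb0
    exact ⟨hsr, hlo, h0 rfl⟩
  | succ f ih =>
    intro b sr hsr hb hlo h0 hb1
    rw [pvDownLoop]
    split
    · rename_i hbne
      obtain ⟨j, hjf, hbj⟩ : ∃ j : Nat, j < f + 1 ∧ b = 2 ^ j := by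
        rcases hb with h | h
        · exact absurd h hbne
        · exact h
      have hbup := hb1 hbne
      rw [pvShiftOne]
      cases j with
      | zero =>
        have hb1' : b = 1 := by simpa using hbj
        subst hb1'
        norm_num
        split
        · rename_i htake
          refine ih 0 (sr + 1) (by omega) (Or.inl rfl) (by linarith) (fun _ => ?_) (by simp)
          norm_num at hbup
          linarith
        · rename_i hskip
          push_neg at hskip
          refine ih 0 sr hsr (Or.inl rfl) hlo (fun _ => ?_) (by simp)
          linarith
      | succ j' =>
        have hpj : (0:Int) < 2 ^ j' := pow_pos (by norm_num) j'
        have hhalf : b / 2 = 2 ^ j' := by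
          rw [hbj, pow_succ, Int.mul_ediv_cancel _ (by norm_num)]
        rw [hhalf]
        have h2b : 2 * (2:Int) ^ j' = b := by rw [hbj, pow_succ]; ring
        split
        · rename_i htake
          refine ih (2 ^ j') (sr + b) (by omega) (Or.inr ⟨j', by omega, rfl⟩)
            (by linarith) (by omega) (fun _ => ?_)
          have : sr + b + 2 * 2 ^ j' = sr + 2 * b := by omega
          rw [this]
          linarith
        · rename_i hskip
          push_neg at hskip
          refine ih (2 ^ j') sr hsr (Or.inr ⟨j', by omega, rfl⟩) hlo (by omega)
            (fun _ => ?_)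
          have : sr + 2 * 2 ^ j' = sr + b := by omega
          rw [this]
          linarith
    · rename_i hbz
      push_neg at hbz
      subst hbz
      exact ⟨hsr, hlo, h0 rfl⟩

lemma pvCharA (a : Int) (hdom : Dom_rootPronic a) (ha : 0 ≤ a) : pvChar a (rootPronic a) := by
  have hb : a ≤ 2147483648 := by
    unfold Dom_rootPronic pvDomInt at hdom
    exact (of_decide_eq_true hdom).2
  unfold rootPronic
  show pvChar a (pvDownLoop 64 a (pvHalveLoop 64 a ((1:Int) <<< (33:Nat)))
    ((pvHalveLoop 64 a ((1:Int) <<< (33:Nat))) >>> (1:Nat)))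
  have h33 : (1:Int) <<< (33:Nat) = 2 ^ 33 := by decide
  rw [h33]
  obtain ⟨hr0, hrlo, hrup⟩ := pvHalveLoop_spec a ha 64 33 (by omega) (by norm_num; omega)
  set r := pvHalveLoop 64 a (2 ^ 33) with hr
  rcases hrup with ⟨hrz, ha2⟩ | ⟨j, hj, hrj, hbd⟩
  · rw [hrz]
    have hz : ((0:Int)) >>> (1:Nat) = 0 := by decide
    rw [hz]
    exact pvDownLoop_spec a 64 0 0 (le_refl _) (Or.inl rfl) (by simpa using ha)
      (fun _ => by norm_num; omega) (by simp)
  · rw [hrj, pvShiftOne]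
    cases j with
    | zero =>
      norm_num
      refine pvDownLoop_spec a 64 0 1 (by norm_num) (Or.inl rfl)
        (by rw [hrj] at hrlo; simpa using hrlo) (fun _ => ?_) (by simp)
      rw [hrj] at hbd
      norm_num at hbd ⊢
      linarith
    | succ j' =>
      have hhalf : (2:Int) ^ (j' + 1) / 2 = 2 ^ j' := by
        rw [pow_succ, Int.mul_ediv_cancel _ (by norm_num)]
      rw [hhalf]
      refine pvDownLoop_spec a 64 (2 ^ j') (2 ^ (j' + 1)) (by positivity)
        (Or.inr ⟨j', by omega, rfl⟩) (by rw [hrj] at hrlo; exact hrlo)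
        (by have := pow_pos (show (0:Int) < 2 by norm_num) j'; omega) (fun _ => ?_)
      rw [hrj] at hbd
      have he : (2:Int) ^ (j' + 1) + 2 * 2 ^ j' = 2 * 2 ^ (j' + 1) := by
        rw [pow_succ]; ring
      rw [he]
      linarith

-- ---- B side: Newton's method computes the integer square root ----

-- one Newton step never drops below the root: x ≥ 1, s² ≤ n  ⇒  s ≤ (x + n//x)//2
lemma pvNewton_step_ge (n x s : Int) (hx : 1 ≤ x) (hsn : s * s ≤ n) :
    s ≤ pvNewtonStep n x := by
  have hxpos : (0:Int) < x := by omega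
  unfold pvNewtonStep
  rw [PySem.Int.floordiv_eq_ediv_of_pos (by norm_num), PySem.Int.floordiv_eq_ediv_of_pos hxpos]
  have hq := Int.ediv_add_emod n x
  have hr0 := Int.emod_nonneg n (by omega : x ≠ 0)
  have hrx := Int.emod_lt_of_pos n hxpos
  set q := n / x with hqdef
  have key : 2 * s ≤ x + q := by
    by_contra hcon
    push_neg at hcon
    have hq' : q ≤ 2 * s - 1 - x := by omega
    nlinarith [sq_nonneg (s - x)]
  omega

lemma pvNewtonIter_spec (n s : Int) (hs1 : 1 ≤ s) (hlo : s * s ≤ n)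
    (hhi : n < (s + 1) * (s + 1)) :
    ∀ m : Nat, ∀ x : Int, x.toNat = m → s ≤ x → pvNewtonIter n x = s := by
  intro m
  induction m using Nat.strong_induction_on with
  | _ m ih =>
    intro x hm hsx
    have hx1 : 1 ≤ x := by omega
    rw [pvNewtonIter]
    have hys : s ≤ pvNewtonStep n x := pvNewton_step_ge n x s hx1 hlo
    split
    · rename_i hcond
      exact ih (pvNewtonStep n x).toNat (by omega) _ rfl hys
    · rename_i hcond
      -- the loop stopped; show x = s (otherwise n < x² would force another smaller step)
      have hyx : ¬ pvNewtonStep n x < x := fun h => hcond ⟨by omega, h⟩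
      push_neg at hyx
      by_contra hne
      have hxs : s + 1 ≤ x := by omega
      have hnx : n < x * x := by nlinarith
      have hqlt : PySem.Int.floordiv n x < x := by
        rw [PySem.Int.floordiv_eq_ediv_of_pos (by omega : (0:Int) < x)]
        exact Int.ediv_lt_of_lt_mul (by omega) (by nlinarith)
      have hstep : pvNewtonStep n x < x := by
        unfold pvNewtonStep
        rw [PySem.Int.floordiv_eq_ediv_of_pos (by norm_num : (0:Int) < 2)]
        rw [PySem.Int.floordiv_eq_ediv_of_pos (by omega : (0:Int) < x)] at hqlt ⊢
        omega
      omega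

lemma pvCharB (a : Int) (ha : 0 ≤ a) : pvChar a (rootPronic_alt a) := by
  rcases le_or_gt a 0 with h0 | hpos
  · have ha0 : a = 0 := le_antisymm h0 ha
    subst ha0
    have hv : rootPronic_alt 0 = 0 := by decide
    rw [hv]
    exact ⟨le_refl _, by norm_num, by norm_num⟩
  · unfold rootPronic_alt pvIsqrt
    set n := 4 * a + 1 with hn
    have hn2 : 1 < n := by omega
    rw [if_neg (by omega)]
    set s : Int := (Nat.sqrt n.toNat : Int) with hsdef
    have hn0 : (0:Int) ≤ n := by omega
    have hncast : (n.toNat : Int) = n := Int.toNat_of_nonneg hn0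
    have hlo : s * s ≤ n := by
      have h : n.toNat.sqrt * n.toNat.sqrt ≤ n.toNat := by
        simpa [pow_two] using Nat.sqrt_le' n.toNat
      rw [hsdef, ← hncast]
      exact_mod_cast h
    have hhi : n < (s + 1) * (s + 1) := by
      have h : n.toNat < (n.toNat.sqrt + 1) * (n.toNat.sqrt + 1) := by
        simpa [pow_two, Nat.succ_eq_add_one] using Nat.lt_succ_sqrt' n.toNat
      rw [hsdef, ← hncast]
      exact_mod_cast h
    have hs0 : (0:Int) ≤ s := by rw [hsdef]; exact Int.natCast_nonneg _
    have hs1 : 1 ≤ s := by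
      by_contra h
      push_neg at h
      have hseq : s = 0 := by omega
      rw [hseq] at hhi
      norm_num at hhi
      omega
    have hsx : s ≤ PySem.Int.floordiv n 2 := by
      rw [PySem.Int.floordiv_eq_ediv_of_pos (by norm_num : (0:Int) < 2)]
      have h2s : 2 * s ≤ n := by nlinarith
      omega
    rw [pvNewtonIter_spec n s hs1 hlo hhi (PySem.Int.floordiv n 2).toNat _ rfl hsx]
    rw [PySem.Int.floordiv_eq_ediv_of_pos (by norm_num : (0:Int) < 2)]
    set r := (s - 1) / 2 with hrdef
    have hr : 2 * r ≤ s - 1 ∧ s - 1 ≤ 2 * r + 1 := by omega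
    refine ⟨by omega, by nlinarith [hr.1, hr.2], by nlinarith [hr.1, hr.2]⟩

-- ===== VERDICT (by name: the statement is the Claim_ definition above) =====
theorem rootPronic_spec : Claim_equal_rootPronic := by
  intro a hdom hpre
  unfold Spec_rootPronic
  exact pvChar_unique (pvCharA a hdom hpre) (pvCharB a hpre)
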